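-- pv_equiv track=rewrite | github.com/mycpuorg/openevolve | examples/attention_optimization/evaluator.py | analyze_ir_complexity
-- ===== SOURCE A (Python) =====
-- def analyze_ir_complexity(mlir_content):
--     """Analyze MLIR IR for performance-relevant characteristics"""
--     lines = mlir_content.splitlines()
--
--     metrics = {
--         'total_lines': len(lines),
--         'total_chars': len(mlir_content),
--         'operations': 0,
--         'loops': 0,
--         'memory_ops': 0,
--         'arithmetic_ops': 0,
--         'linalg_ops': 0,
--         'func_calls': 0,
--         'nested_depth': 0
--     }
--
--     current_depth = 0
--     max_depth = 0
--
--     for line in lines: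
--         stripped = line.strip()
--         if not stripped or stripped.startswith('//'):
--             continue
--
--         # Count braces for nesting depth
--         current_depth += stripped.count('{') - stripped.count('}')
--         max_depth = max(max_depth, current_depth)
--
--         # Count different operation types
--         if '=' in stripped and ('%' in stripped or '@' in stripped):
--             metrics['operations'] += 1
--
--         # Specific operation patterns
--         if any(loop_kw in stripped for loop_kw in ['scf.for', 'affine.for', 'scf.while']):
--             metrics['loops'] += 1
--
--         if any(mem_op in stripped for mem_op in ['memref.load', 'memref.store', 'tensor.extract', 'tensor.insert']):
--             metrics['memory_ops'] += 1
--
--         if any(arith_op in stripped for arith_op in ['arith.addf', 'arith.mulf', 'arith.divf', 'arith.subf']):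
--             metrics['arithmetic_ops'] += 1
--
--         if 'linalg.' in stripped:
--             metrics['linalg_ops'] += 1
--
--         if 'func.call' in stripped or 'call @' in stripped:
--             metrics['func_calls'] += 1
--
--     metrics['nested_depth'] = max_depth
--     return metrics
-- ===== SOURCE B (Python) =====
-- def analyze_ir_complexity(mlir_content):
--     """Analyze MLIR IR for performance-relevant characteristics"""
--     lines = mlir_content.splitlines()
--     filtered = [s for s in (l.strip() for l in lines)
--                 if s and not s.startswith('//')]
--
--     depth = peak = 0
--     for s in filtered:
--         depth += s.count('{') - s.count('}')
--         peak = max(peak, depth)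
--
--     return {
--         'total_lines': len(lines),
--         'total_chars': len(mlir_content),
--         'operations': sum('=' in s and ('%' in s or '@' in s) for s in filtered),
--         'loops': sum(any(k in s for k in ('scf.for', 'affine.for', 'scf.while'))
--                      for s in filtered),
--         'memory_ops': sum(any(k in s for k in ('memref.load', 'memref.store',
--                                                'tensor.extract', 'tensor.insert'))
--                           for s in filtered),
--         'arithmetic_ops': sum(any(k in s for k in ('arith.addf', 'arith.mulf',
--                                                    'arith.divf', 'arith.subf'))
--                               for s in filtered),
--         'linalg_ops': sum('linalg.' in s for s in filtered),
--         'func_calls': sum('func.call' in s or 'call @' in s for s in filtered),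
--         'nested_depth': peak,
--     }
-- ===== Notes on version B (the rewrite author's own statement) =====
-- stated objective: idiomatic
-- what changed: B builds the stripped, comment/blank-filtered line list once, computes each counter as an independent sum over it and the nesting peak as a separate running-max pass, and assembles the metrics dict as a single literal, instead of A's one loop threading a mutable dict through per-line increments.
import Mathlib
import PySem

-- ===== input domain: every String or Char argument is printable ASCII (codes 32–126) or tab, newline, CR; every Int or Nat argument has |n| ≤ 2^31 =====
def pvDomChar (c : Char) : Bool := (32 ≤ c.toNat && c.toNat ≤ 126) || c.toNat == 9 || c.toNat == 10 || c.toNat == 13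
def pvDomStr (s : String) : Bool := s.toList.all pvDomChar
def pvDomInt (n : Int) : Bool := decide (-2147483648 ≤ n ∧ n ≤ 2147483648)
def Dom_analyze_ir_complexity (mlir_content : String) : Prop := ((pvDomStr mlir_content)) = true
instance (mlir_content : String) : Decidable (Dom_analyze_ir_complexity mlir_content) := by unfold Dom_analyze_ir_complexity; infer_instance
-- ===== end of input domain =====

-- B filters/strips the lines once, computes each counter as its own sum and the
-- nesting peak as a separate running-max pass, and assembles the metrics dict as
-- one literal, instead of A's single loop threading a mutable dict (objective: more idiomatic).

-- ===== PORT A =====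
-- shared per-line predicates (the literal substring tests of both Pythons)
def pvKeep (s : String) : Bool := !(PySem.Str.len s == 0 || PySem.Str.startswith s "//")
def pvOps (s : String) : Bool := PySem.Str.isIn "=" s && (PySem.Str.isIn "%" s || PySem.Str.isIn "@" s)
def pvLoop (s : String) : Bool := ["scf.for", "affine.for", "scf.while"].any (fun k => PySem.Str.isIn k s)
def pvMem (s : String) : Bool := ["memref.load", "memref.store", "tensor.extract", "tensor.insert"].any (fun k => PySem.Str.isIn k s)
def pvArith (s : String) : Bool := ["arith.addf", "arith.mulf", "arith.divf", "arith.subf"].any (fun k => PySem.Str.isIn k s)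
def pvLinalg (s : String) : Bool := PySem.Str.isIn "linalg." s
def pvCall (s : String) : Bool := PySem.Str.isIn "func.call" s || PySem.Str.isIn "call @" s
-- the net brace delta of a stripped line
def pvDelta (s : String) : Int := (PySem.Str.count s "{" : Int) - (PySem.Str.count s "}" : Int)

-- the non-skipped part of A's loop body, on the stripped line (state: metrics, current_depth, max_depth)
def aUpd (st : PySem.Dict String Int × Int × Int) (stripped : String) : PySem.Dict String Int × Int × Int :=
  let cur := st.2.1 + pvDelta stripped
  let mx := max st.2.2 cur
  let m := st.1
  let m := if pvOps stripped then m.modify "operations" 0 (· + 1) else m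
  let m := if pvLoop stripped then m.modify "loops" 0 (· + 1) else m
  let m := if pvMem stripped then m.modify "memory_ops" 0 (· + 1) else m
  let m := if pvArith stripped then m.modify "arithmetic_ops" 0 (· + 1) else m
  let m := if pvLinalg stripped then m.modify "linalg_ops" 0 (· + 1) else m
  let m := if pvCall stripped then m.modify "func_calls" 0 (· + 1) else m
  (m, cur, mx)

-- A's loop body for one raw line: strip, skip blank//comment lines, else update
def aStep (st : PySem.Dict String Int × Int × Int) (line : String) : PySem.Dict String Int × Int × Int :=
  let stripped := PySem.Str.strip line
  if !(pvKeep stripped) then st else aUpd st stripped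

def analyze_ir_complexity (mlir_content : String) : List (String × Int) :=
  let lines := PySem.Str.splitlines mlir_content
  let metrics : PySem.Dict String Int :=
    ((((((((PySem.Dict.empty.insert "total_lines" (lines.length : Int)).insert
      "total_chars" (PySem.Str.len mlir_content : Int)).insert
      "operations" 0).insert "loops" 0).insert "memory_ops" 0).insert
      "arithmetic_ops" 0).insert "linalg_ops" 0).insert "func_calls" 0).insert "nested_depth" 0
  let st := lines.foldl aStep (metrics, 0, 0)
  (st.1.insert "nested_depth" st.2.2).items

-- ===== PORT B =====
def analyze_ir_complexity_alt (mlir_content : String) : List (String × Int) :=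
  let lines := PySem.Str.splitlines mlir_content
  let filtered := (lines.map PySem.Str.strip).filter pvKeep
  let peak := (filtered.foldl
      (fun (p : Int × Int) s => let d := p.1 + pvDelta s; (d, max p.2 d)) (0, 0)).2
  [("total_lines", (lines.length : Int)),
   ("total_chars", (PySem.Str.len mlir_content : Int)),
   ("operations", (filtered.countP pvOps : Int)),
   ("loops", (filtered.countP pvLoop : Int)),
   ("memory_ops", (filtered.countP pvMem : Int)),
   ("arithmetic_ops", (filtered.countP pvArith : Int)),
   ("linalg_ops", (filtered.countP pvLinalg : Int)),
   ("func_calls", (filtered.countP pvCall : Int)),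
   ("nested_depth", peak)]

-- ===== PRECONDITION & SPEC =====
def Spec_analyze_ir_complexity (mlir_content : String) (out : List (String × Int)) : Prop := out = analyze_ir_complexity_alt mlir_content
instance (mlir_content : String) (out : List (String × Int)) : Decidable (Spec_analyze_ir_complexity mlir_content out) := by unfold Spec_analyze_ir_complexity; infer_instance

-- ===== CLAIM (what is proved, stated in full; the proofs are below) =====
def Claim_equal_analyze_ir_complexity : Prop := ∀ (mlir_content : String), Dom_analyze_ir_complexity mlir_content → Spec_analyze_ir_complexity mlir_content (analyze_ir_complexity mlir_content)

-- ===== LEMMAS AND PROOFS =====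

-- the literal nine-key metrics dict, abstracted over its values
def mk9 (tl tc c l m ar li fc nd : Int) : PySem.Dict String Int :=
  ((((((((PySem.Dict.empty.insert "total_lines" tl).insert
    "total_chars" tc).insert
    "operations" c).insert "loops" l).insert "memory_ops" m).insert
    "arithmetic_ops" ar).insert "linalg_ops" li).insert "func_calls" fc).insert "nested_depth" nd

theorem mod_ops (tl tc c l m ar li fc nd : Int) :
    (mk9 tl tc c l m ar li fc nd).modify "operations" 0 (· + 1) = mk9 tl tc (c+1) l m ar li fc nd := by
  apply PySem.Dict.ext
  simp [mk9, PySem.Dict.modify, PySem.Dict.items_insert, PySem.Dict.contains_insert,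
    PySem.Dict.getD_insert, PySem.Dict.empty]

theorem mod_loops (tl tc c l m ar li fc nd : Int) :
    (mk9 tl tc c l m ar li fc nd).modify "loops" 0 (· + 1) = mk9 tl tc c (l+1) m ar li fc nd := by
  apply PySem.Dict.ext
  simp [mk9, PySem.Dict.modify, PySem.Dict.items_insert, PySem.Dict.contains_insert,
    PySem.Dict.getD_insert, PySem.Dict.empty]

theorem mod_mem (tl tc c l m ar li fc nd : Int) :
    (mk9 tl tc c l m ar li fc nd).modify "memory_ops" 0 (· + 1) = mk9 tl tc c l (m+1) ar li fc nd := by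
  apply PySem.Dict.ext
  simp [mk9, PySem.Dict.modify, PySem.Dict.items_insert, PySem.Dict.contains_insert,
    PySem.Dict.getD_insert, PySem.Dict.empty]

theorem mod_arith (tl tc c l m ar li fc nd : Int) :
    (mk9 tl tc c l m ar li fc nd).modify "arithmetic_ops" 0 (· + 1) = mk9 tl tc c l m (ar+1) li fc nd := by
  apply PySem.Dict.ext
  simp [mk9, PySem.Dict.modify, PySem.Dict.items_insert, PySem.Dict.contains_insert,
    PySem.Dict.getD_insert, PySem.Dict.empty]

theorem mod_linalg (tl tc c l m ar li fc nd : Int) :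
    (mk9 tl tc c l m ar li fc nd).modify "linalg_ops" 0 (· + 1) = mk9 tl tc c l m ar (li+1) fc nd := by
  apply PySem.Dict.ext
  simp [mk9, PySem.Dict.modify, PySem.Dict.items_insert, PySem.Dict.contains_insert,
    PySem.Dict.getD_insert, PySem.Dict.empty]

theorem mod_call (tl tc c l m ar li fc nd : Int) :
    (mk9 tl tc c l m ar li fc nd).modify "func_calls" 0 (· + 1) = mk9 tl tc c l m ar li (fc+1) nd := by
  apply PySem.Dict.ext
  simp [mk9, PySem.Dict.modify, PySem.Dict.items_insert, PySem.Dict.contains_insert,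
    PySem.Dict.getD_insert, PySem.Dict.empty]

theorem insert_nd (tl tc c l m ar li fc nd x : Int) :
    (mk9 tl tc c l m ar li fc nd).insert "nested_depth" x = mk9 tl tc c l m ar li fc x := by
  apply PySem.Dict.ext
  simp [mk9, PySem.Dict.items_insert, PySem.Dict.contains_insert, PySem.Dict.empty]

theorem items_mk9 (tl tc c l m ar li fc nd : Int) :
    (mk9 tl tc c l m ar li fc nd).items =
      [("total_lines", tl), ("total_chars", tc), ("operations", c), ("loops", l),
       ("memory_ops", m), ("arithmetic_ops", ar), ("linalg_ops", li),
       ("func_calls", fc), ("nested_depth", nd)] := by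
  simp [mk9, PySem.Dict.items_insert, PySem.Dict.contains_insert, PySem.Dict.empty]

-- one update step in closed form
theorem aUpd_mk9 (tl tc c l m ar li fc nd cur mx : Int) (s : String) :
    aUpd (mk9 tl tc c l m ar li fc nd, cur, mx) s =
      (mk9 tl tc (c + if pvOps s then 1 else 0) (l + if pvLoop s then 1 else 0)
        (m + if pvMem s then 1 else 0) (ar + if pvArith s then 1 else 0)
        (li + if pvLinalg s then 1 else 0) (fc + if pvCall s then 1 else 0) nd,
       cur + pvDelta s, max mx (cur + pvDelta s)) := by
  unfold aUpd
  split_ifs <;>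
    simp only [mod_ops, mod_loops, mod_mem, mod_arith, mod_linalg, mod_call, add_zero]

-- fold of A's loop over the raw lines = fold of the kept branch over the stripped, filtered lines
theorem aStep_keep (st : PySem.Dict String Int × Int × Int) (line : String)
    (hk : pvKeep (PySem.Str.strip line) = true) : aStep st line = aUpd st (PySem.Str.strip line) := by
  simp [aStep, hk]

theorem aStep_skip (st : PySem.Dict String Int × Int × Int) (line : String)
    (hk : pvKeep (PySem.Str.strip line) = false) : aStep st line = st := by
  simp [aStep, hk]

theorem foldA_filter (lines : List String) (st : PySem.Dict String Int × Int × Int) :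
    lines.foldl aStep st = ((lines.map PySem.Str.strip).filter pvKeep).foldl aUpd st := by
  induction lines generalizing st with
  | nil => simp only [List.map_nil, List.filter_nil, List.foldl_nil]
  | cons h t ih =>
    simp only [List.map_cons, List.filter_cons, List.foldl_cons]
    by_cases hk : pvKeep (PySem.Str.strip h) = true
    · rw [aStep_keep st h hk, hk, if_pos rfl, List.foldl_cons, ih]
    · simp only [Bool.not_eq_true] at hk
      rw [aStep_skip st h hk, hk, if_neg (by simp), ih]

-- main invariant: the kept-branch fold, in closed form
theorem fold_inv (fs : List String) :
    ∀ (tl tc c l m ar li fc nd cur mx : Int),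
    fs.foldl aUpd (mk9 tl tc c l m ar li fc nd, cur, mx) =
      (mk9 tl tc (c + fs.countP pvOps) (l + fs.countP pvLoop) (m + fs.countP pvMem)
        (ar + fs.countP pvArith) (li + fs.countP pvLinalg) (fc + fs.countP pvCall) nd,
       fs.foldl (fun (p : Int × Int) s => let d := p.1 + pvDelta s; (d, max p.2 d)) (cur, mx)) := by
  induction fs with
  | nil =>
    intro tl tc c l m ar li fc nd cur mx
    simp only [List.foldl_nil, List.countP_nil, Int.natCast_zero, add_zero]
  | cons h t ih =>
    intro tl tc c l m ar li fc nd cur mx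
    rw [List.foldl_cons, aUpd_mk9, ih]
    simp only [List.countP_cons, List.foldl_cons]
    congr 2 <;> push_cast <;> split_ifs <;> ring

-- ===== VERDICT (by name: the statement is the Claim_ definition above) =====
theorem analyze_ir_complexity_spec : Claim_equal_analyze_ir_complexity := by
  intro mlir_content _
  unfold Spec_analyze_ir_complexity analyze_ir_complexity analyze_ir_complexity_alt
  simp only []
  rw [show ((((((((PySem.Dict.empty.insert "total_lines" ((PySem.Str.splitlines mlir_content).length : Int)).insert
      "total_chars" (PySem.Str.len mlir_content : Int)).insert
      "operations" 0).insert "loops" 0).insert "memory_ops" 0).insert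
      "arithmetic_ops" 0).insert "linalg_ops" 0).insert "func_calls" 0).insert "nested_depth" 0
      = mk9 ((PySem.Str.splitlines mlir_content).length : Int) (PySem.Str.len mlir_content : Int) 0 0 0 0 0 0 0 from rfl]
  rw [foldA_filter, fold_inv]
  simp only [zero_add, insert_nd, items_mk9]
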